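-- pv_equiv track=rewrite | github.com/HaoJiang/LeetCode- | 356. Line Reflection(Medium).py | lref
-- ===== SOURCE A (Python) =====
-- def lref(matrix):
--     map = set()
--     x_left = float('inf')
--     x_right = float('-inf')
--     for x, y in matrix:
--         x_left = min(x, x_left)
--         x_right = max(x, x_right)
--         map.add((x, y))
--     mid = x_left + x_right
--     for x, y in matrix:
--         if (mid - x, y) not in map:
--             return False
--     return True
-- ===== SOURCE B (Python) =====
-- def lref(matrix):
--     rows = {}
--     bounds = None
--     for x, y in matrix:
--         if bounds is None:
--             bounds = (x, x)
--         else: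
--             lo, hi = bounds
--             bounds = (x if x < lo else lo, x if hi < x else hi)
--         rows.setdefault(y, set()).add(x)
--     if bounds is None:
--         return True
--     mid = bounds[0] + bounds[1]
--     for xs in rows.values():
--         s = sorted(xs)
--         i, j = 0, len(s) - 1
--         while i <= j:
--             if s[i] + s[j] != mid:
--                 return False
--             i += 1
--             j -= 1
--     return True
-- ===== Notes on version B (the rewrite author's own statement) =====
-- stated objective: alternative
-- what changed: A builds one global point set and tests each point's reflection for membership; B groups the distinct x-coordinates by y-row in a dict, sorts each row, and checks row symmetry around mid with a two-pointer scan from both ends (s[i]+s[j]==mid), never doing reflected-point lookups.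
import Mathlib
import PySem

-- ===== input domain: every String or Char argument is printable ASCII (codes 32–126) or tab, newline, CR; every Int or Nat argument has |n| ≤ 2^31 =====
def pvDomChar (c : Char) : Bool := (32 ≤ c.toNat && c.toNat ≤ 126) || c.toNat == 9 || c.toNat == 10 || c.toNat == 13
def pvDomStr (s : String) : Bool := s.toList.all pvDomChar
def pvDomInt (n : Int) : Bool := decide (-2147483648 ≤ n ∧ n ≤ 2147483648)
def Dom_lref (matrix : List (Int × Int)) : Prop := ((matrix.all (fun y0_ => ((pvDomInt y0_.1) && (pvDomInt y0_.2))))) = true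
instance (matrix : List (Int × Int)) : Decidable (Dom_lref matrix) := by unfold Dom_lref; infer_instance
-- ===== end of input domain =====

-- B replaces A's global reflected-point membership test by a per-row symmetry check: group the
-- distinct x's by y in a dict, sort each row, two-pointer scan requiring s[i]+s[j] = mid (objective: alternative).

-- ===== PORT A =====
-- A's float('inf') / float('-inf') sentinels are ported as Option Int with none = "still infinite";
-- mid's default 0 in the none case is never read: the final loop is vacuous exactly when matrix = [].
def lref (matrix : List (Int × Int)) : Bool :=
  let st := matrix.foldl
    (fun (st : Option Int × Option Int × PySem.Set (Int × Int)) (p : Int × Int) =>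
      (some (match st.1 with | none => p.1 | some v => min p.1 v),
       some (match st.2.1 with | none => p.1 | some v => max p.1 v),
       PySem.Set.add st.2.2 p))
    (none, none, PySem.Set.empty)
  let mid : Int := match st.1, st.2.1 with | some a, some b => a + b | _, _ => 0
  matrix.all (fun p => PySem.Set.contains st.2.2 (mid - p.1, p.2))

-- ===== PORT B =====
-- B's while loop with the two pointers i, j; the `| _, _ => false` arm is Python's IndexError
-- (unreachable: both indices stay in range while i ≤ j).
-- fuel only makes the recursion structural; it is started at s.length + 1 and never runs out.
def twoPtrLoop (s : List Int) (mid : Int) : Nat → Int → Int → Bool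
  | 0, _, _ => true
  | fuel + 1, i, j =>
    if i ≤ j then
      match PySem.List.pyGet? s i with
      | none => false
      | some a =>
        match PySem.List.pyGet? s j with
        | none => false
        | some b => if a + b ≠ mid then false else twoPtrLoop s mid fuel (i + 1) (j - 1)
    else true

-- `rows.setdefault(y, set()).add(x)` is ported as insert of the updated set: same lookup,
-- same key position (insert overwrites in place / appends new keys, as setdefault does).
-- `bounds` (None until the first point) is the Option (Int × Int) accumulator.
def lref_alt (matrix : List (Int × Int)) : Bool :=
  let st := matrix.foldl
    (fun (st : Option (Int × Int) × PySem.Dict Int (PySem.Set Int)) (p : Int × Int) =>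
      ((match st.1 with
        | none => some (p.1, p.1)
        | some (lo, hi) => some ((if p.1 < lo then p.1 else lo), (if hi < p.1 then p.1 else hi))),
       st.2.insert p.2 (PySem.Set.add (st.2.getD p.2 PySem.Set.empty) p.1)))
    (none, PySem.Dict.empty)
  match st.1 with
  | none => true
  | some (lo, hi) =>
    let mid := lo + hi
    st.2.values.all (fun xs =>
      let s := PySem.List.sorted xs (fun x => x) false
      twoPtrLoop s mid (s.length + 1) 0 ((s.length : Int) - 1))

-- ===== PRECONDITION & SPEC =====
def Spec_lref (matrix : List (Int × Int)) (out : Bool) : Prop := out = lref_alt matrix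
instance (matrix : List (Int × Int)) (out : Bool) : Decidable (Spec_lref matrix out) := by unfold Spec_lref; infer_instance

-- ===== CLAIM (what is proved, stated in full; the proofs are below) =====
def Claim_equal_lref : Prop := ∀ (matrix : List (Int × Int)), Dom_lref matrix → Spec_lref matrix (lref matrix)

-- ===== LEMMAS AND PROOFS =====

-- in-range indexing: Python s[i] for 0 ≤ i < len(s)
theorem lref_pyGet?_in_range (s : List Int) (i : Int) (h0 : 0 ≤ i) (h1 : i < (s.length : Int)) :
    PySem.List.pyGet? s i = some (PySem.List.pyGetD s i 0) := by
  have hlt : i.toNat < s.length := by omega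
  simp [PySem.List.pyGet?, PySem.List.pyGetD, PySem.List.pyIdx?, h0, h1]

-- A's single loop, split into its three independent folds.
theorem lrefA_fold_split (l : List (Int × Int)) (o1 o2 : Option Int) (s : PySem.Set (Int × Int)) :
    l.foldl
      (fun (st : Option Int × Option Int × PySem.Set (Int × Int)) (p : Int × Int) =>
        (some (match st.1 with | none => p.1 | some v => min p.1 v),
         some (match st.2.1 with | none => p.1 | some v => max p.1 v),
         PySem.Set.add st.2.2 p))
      (o1, o2, s)
    = (l.foldl (fun o p => some (match o with | none => p.1 | some v => min p.1 v)) o1,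
       l.foldl (fun o p => some (match o with | none => p.1 | some v => max p.1 v)) o2,
       l.foldl PySem.Set.add s) := by
  induction l generalizing o1 o2 s with
  | nil => rfl
  | cons p t ih => simpa [List.foldl] using ih _ _ _

-- A's running min/max folds, started from a value, compute the plain running min/max.
theorem lrefA_min_some (t : List (Int × Int)) (v : Int) :
    t.foldl (fun o p => some (match o with | none => p.1 | some w => min p.1 w)) (some v)
      = some (t.foldl (fun w p => min p.1 w) v) := by
  induction t generalizing v with
  | nil => rfl
  | cons p t ih => simpa [List.foldl] using ih (min p.1 v)

theorem lrefA_max_some (t : List (Int × Int)) (v : Int) :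
    t.foldl (fun o p => some (match o with | none => p.1 | some w => max p.1 w)) (some v)
      = some (t.foldl (fun w p => max p.1 w) v) := by
  induction t generalizing v with
  | nil => rfl
  | cons p t ih => simpa [List.foldl] using ih (max p.1 v)

-- B's single loop, split into the bounds fold and the dict fold.
theorem lrefB_fold_split (l : List (Int × Int)) (o : Option (Int × Int))
    (d : PySem.Dict Int (PySem.Set Int)) :
    l.foldl
      (fun (st : Option (Int × Int) × PySem.Dict Int (PySem.Set Int)) (p : Int × Int) =>
        ((match st.1 with
          | none => some (p.1, p.1)
          | some (lo, hi) => some ((if p.1 < lo then p.1 else lo), (if hi < p.1 then p.1 else hi))),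
         st.2.insert p.2 (PySem.Set.add (st.2.getD p.2 PySem.Set.empty) p.1)))
      (o, d)
    = (l.foldl
        (fun o p => match o with
          | none => some (p.1, p.1)
          | some (lo, hi) => some ((if p.1 < lo then p.1 else lo), (if hi < p.1 then p.1 else hi))) o,
       l.foldl (fun d p => d.insert p.2 (PySem.Set.add (d.getD p.2 PySem.Set.empty) p.1)) d) := by
  induction l generalizing o d with
  | nil => rfl
  | cons p t ih => simpa [List.foldl] using ih _ _

-- B's bounds fold, started from a pair, is the pair of running min and running max.
theorem lrefB_bounds (t : List (Int × Int)) (lo hi : Int) :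
    t.foldl
      (fun o p => match o with
        | none => some (p.1, p.1)
        | some (lo, hi) => some ((if p.1 < lo then p.1 else lo), (if hi < p.1 then p.1 else hi)))
      (some (lo, hi))
    = some (t.foldl (fun w p => min p.1 w) lo, t.foldl (fun w p => max p.1 w) hi) := by
  induction t generalizing lo hi with
  | nil => rfl
  | cons p t ih =>
    have h1 : (if p.1 < lo then p.1 else lo) = min p.1 lo := by rw [min_def]; split_ifs <;> omega
    have h2 : (if hi < p.1 then p.1 else hi) = max p.1 hi := by rw [max_def]; split_ifs <;> omega
    simpa [List.foldl, h1, h2] using ih (min p.1 lo) (max p.1 hi)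

-- the dict fold's row for key y: exactly the x's of the points with that y, as a set.
theorem lrefB_dict_getD (l : List (Int × Int)) (d : PySem.Dict Int (PySem.Set Int)) (y : Int) :
    (l.foldl (fun d p => d.insert p.2 (PySem.Set.add (d.getD p.2 PySem.Set.empty) p.1)) d).getD y PySem.Set.empty
    = PySem.Set.update (d.getD y PySem.Set.empty) ((l.filter (fun p => p.2 == y)).map Prod.fst) := by
  induction l generalizing d with
  | nil => rfl
  | cons p t ih =>
    simp only [List.foldl_cons, ih, List.filter_cons]
    by_cases h : p.2 = y
    · subst h
      simp [PySem.Set.update_cons]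
    · simp [PySem.Dict.getD_insert, h, Ne.symm h]

theorem lrefB_dict_keys (l : List (Int × Int)) :
    (l.foldl (fun d p => d.insert p.2 (PySem.Set.add (d.getD p.2 PySem.Set.empty) p.1)) PySem.Dict.empty).keys
    = PySem.Set.ofList (l.map Prod.snd) := by
  have h := PySem.Dict.keys_foldl_insert_key l Prod.snd
    (fun d p => PySem.Set.add (d.getD p.2 PySem.Set.empty) p.1) PySem.Dict.empty
  simpa [PySem.Dict.keys_empty, PySem.Set.update_nil_left] using h

theorem lrefB_dict_nodup_keys (l : List (Int × Int)) :
    (l.foldl (fun d p => d.insert p.2 (PySem.Set.add (d.getD p.2 PySem.Set.empty) p.1)) PySem.Dict.empty).keys.Nodup := by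
  exact PySem.Dict.nodup_keys_foldl_insert_key l Prod.snd
    (fun d p => PySem.Set.add (d.getD p.2 PySem.Set.empty) p.1) PySem.Dict.empty
    PySem.Dict.nodup_keys_empty

-- one unfolding step of the two-pointer loop when both indices are read successfully
theorem twoPtrLoop_succ (s : List Int) (mid : Int) (n : Nat) (i j : Int) (a b : Int)
    (hij : i ≤ j) (hgi : PySem.List.pyGet? s i = some a) (hgj : PySem.List.pyGet? s j = some b) :
    twoPtrLoop s mid (n + 1) i j
      = if a + b ≠ mid then false else twoPtrLoop s mid n (i + 1) (j - 1) := by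
  simp [twoPtrLoop, hij, hgi, hgj]

-- B's two-pointer loop succeeds iff every symmetric index pair of s sums to mid.
theorem twoPtrLoop_iff (s : List Int) (mid : Int) :
    ∀ (fuel : Nat) (i j : Int), 0 ≤ i → j < (s.length : Int) → (j + 1 - i).toNat ≤ fuel →
    (twoPtrLoop s mid fuel i j = true ↔
      ∀ k : Int, i ≤ k → k ≤ j →
        PySem.List.pyGetD s k 0 + PySem.List.pyGetD s (i + j - k) 0 = mid) := by
  intro fuel
  induction fuel with
  | zero =>
    intro i j hi hj hf
    have hij : j < i := by omega
    simp only [twoPtrLoop, true_iff]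
    intro k hk1 hk2; omega
  | succ n ih =>
    intro i j hi hj hf
    by_cases hij : i ≤ j
    · have hgi := lref_pyGet?_in_range s i hi (by omega)
      have hgj := lref_pyGet?_in_range s j (by omega) hj
      rw [twoPtrLoop_succ s mid n i j _ _ hij hgi hgj]
      by_cases hsum : PySem.List.pyGetD s i 0 + PySem.List.pyGetD s j 0 = mid
      · rw [if_neg (fun h => h hsum)]
        rw [ih (i + 1) (j - 1) (by omega) (by omega) (by omega)]
        constructor
        · intro h k hk1 hk2
          by_cases hk : i < k ∧ k < j
          · have hh := h k (by omega) (by omega)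
            have e : i + 1 + (j - 1) - k = i + j - k := by ring
            rwa [e] at hh
          · rcases (by omega : k = i ∨ k = j) with hk' | hk'
            · rw [hk', show i + j - i = j by ring]; exact hsum
            · rw [hk', show i + j - j = i by ring]; omega
        · intro h k hk1 hk2
          have hh := h k (by omega) (by omega)
          have e : i + 1 + (j - 1) - k = i + j - k := by ring
          rw [e]; exact hh
      · rw [if_pos hsum]
        simp only [Bool.false_eq_true, false_iff]
        intro h
        have hh := h i le_rfl hij
        rw [show i + j - i = j by ring] at hh
        exact hsum hh
    · have hij' : ¬ i ≤ j := hij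
      simp only [twoPtrLoop, if_neg hij', true_iff]
      intro k hk1 hk2; omega

-- a strictly increasing list is index-symmetric around mid iff it is closed under x ↦ mid - x
theorem lref_strict_sym (s : List Int) (hs : s.Pairwise (· < ·)) (mid : Int) :
    (∀ k : Nat, k < s.length →
        PySem.List.pyGetD s (k : Int) 0 + PySem.List.pyGetD s ((s.length : Int) - 1 - (k : Int)) 0 = mid)
    ↔ (∀ x ∈ s, mid - x ∈ s) := by
  have hnd : s.Nodup := hs.imp (fun h => ne_of_lt h)
  constructor
  · intro h x hx
    obtain ⟨k, hk, rfl⟩ := List.mem_iff_getElem.mp hx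
    have h1 : PySem.List.pyGetD s (k : Int) 0 = s[k] := by
      rw [PySem.List.pyGetD_eq_getElem s 0 (by omega) (by exact_mod_cast hk)]; simp
    have hk2 : s.length - 1 - k < s.length := by omega
    have h2 : PySem.List.pyGetD s ((s.length : Int) - 1 - (k : Int)) 0 = s[s.length - 1 - k] := by
      rw [PySem.List.pyGetD_eq_getElem s 0 (by omega) (by omega)]
      congr 1; omega
    have hh := h k hk
    rw [h1, h2] at hh
    have e : mid - s[k] = s[s.length - 1 - k] := by omega
    rw [e]; exact List.getElem_mem hk2
  · intro hcl
    -- the reflected, reversed list coincides with s, giving the index identity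
    have hsub : ((s.map (fun x => mid - x)).reverse) ⊆ s := by
      intro y hy
      simp only [List.mem_reverse, List.mem_map] at hy
      obtain ⟨x, hx, rfl⟩ := hy
      exact hcl x hx
    have hnd' : ((s.map (fun x => mid - x)).reverse).Nodup := by
      rw [List.nodup_reverse]
      exact hnd.map (fun a b h => by omega)
    have hperm : ((s.map (fun x => mid - x)).reverse).Perm s :=
      (List.subperm_of_subset hnd' hsub).perm_of_length_le (by simp)
    have hple : s.Pairwise (· ≤ ·) := hs.imp le_of_lt
    have hple' : ((s.map (fun x => mid - x)).reverse).Pairwise (· ≤ ·) := by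
      rw [List.pairwise_reverse, List.pairwise_map]
      exact hs.imp (fun h => by omega)
    have heq : (s.map (fun x => mid - x)).reverse = s :=
      PySem.List.eq_of_perm_of_pairwise_le_of_injective (fun x => x)
        (fun a b h => h) hperm hple' hple
    intro k hk
    have hk' : s.length - 1 - k < s.length := by omega
    have hidx : ((s.map (fun x => mid - x)).reverse)[k]? = s[k]? := by rw [heq]
    rw [List.getElem?_reverse (by simpa using hk), List.getElem?_map] at hidx
    simp only [List.length_map, List.getElem?_eq_getElem hk', List.getElem?_eq_getElem hk,
      Option.map_some] at hidx
    have h1 : PySem.List.pyGetD s (k : Int) 0 = s[k] := by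
      rw [PySem.List.pyGetD_eq_getElem s 0 (by omega) (by exact_mod_cast hk)]; simp
    have h2 : PySem.List.pyGetD s ((s.length : Int) - 1 - (k : Int)) 0 = s[s.length - 1 - k] := by
      rw [PySem.List.pyGetD_eq_getElem s 0 (by omega) (by omega)]
      congr 1; omega
    rw [h1, h2]
    have := Option.some.inj hidx
    omega

-- B's per-row check on row xs is exactly closure of xs under reflection across mid
theorem lref_rowcheck (xs : List Int) (mid : Int) :
    (twoPtrLoop (PySem.List.sorted (PySem.Set.ofList xs) (fun x => x)) mid
       ((PySem.List.sorted (PySem.Set.ofList xs) (fun x => x)).length + 1) 0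
       (((PySem.List.sorted (PySem.Set.ofList xs) (fun x => x)).length : Int) - 1) = true)
    ↔ ∀ x ∈ xs, mid - x ∈ xs := by
  set s := PySem.List.sorted (PySem.Set.ofList xs) (fun x => x) with hsdef
  rw [twoPtrLoop_iff s mid (s.length + 1) 0 ((s.length : Int) - 1) le_rfl (by omega) (by omega)]
  have hbridge : (∀ k : Int, 0 ≤ k → k ≤ (s.length : Int) - 1 →
      PySem.List.pyGetD s k 0 + PySem.List.pyGetD s (0 + ((s.length : Int) - 1) - k) 0 = mid)
    ↔ (∀ k : Nat, k < s.length →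
      PySem.List.pyGetD s (k : Int) 0 + PySem.List.pyGetD s ((s.length : Int) - 1 - (k : Int)) 0 = mid) := by
    constructor
    · intro h k hk
      have hh := h (k : Int) (by omega) (by omega)
      rwa [show 0 + ((s.length : Int) - 1) - (k : Int) = (s.length : Int) - 1 - (k : Int) by ring] at hh
    · intro h k h0 h1
      have hh := h k.toNat (by omega)
      rwa [Int.toNat_of_nonneg h0,
        show (s.length : Int) - 1 - k = 0 + ((s.length : Int) - 1) - k by ring] at hh
  rw [hbridge, lref_strict_sym s (PySem.List.sorted_ofList_pairwise_lt xs) mid]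
  simp [PySem.List.mem_sorted, PySem.Set.mem_ofList, hsdef]

-- membership in a row: x is in row y exactly when (x, y) is a point
theorem lref_row_mem (l : List (Int × Int)) (x y : Int) :
    x ∈ (l.filter (fun p => p.2 == y)).map Prod.fst ↔ (x, y) ∈ l := by
  simp only [List.mem_map, List.mem_filter, beq_iff_eq]
  constructor
  · rintro ⟨⟨a, b⟩, ⟨hp, rfl⟩, rfl⟩; exact hp
  · intro h; exact ⟨(x, y), ⟨h, rfl⟩, rfl⟩

-- ===== VERDICT (by name: the statement is the Claim_ definition above) =====
theorem lref_spec : Claim_equal_lref := by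
  intro matrix _
  unfold Spec_lref
  cases matrix with
  | nil => rfl
  | cons q t =>
    show lref (q :: t) = lref_alt (q :: t)
    unfold lref lref_alt
    simp only [lrefA_fold_split, lrefB_fold_split]
    have hAmin : (q :: t).foldl
        (fun o p => some (match o with | none => p.1 | some w => min p.1 w)) none
        = some (t.foldl (fun w p => min p.1 w) q.1) := by
      simpa [List.foldl_cons] using lrefA_min_some t q.1
    have hAmax : (q :: t).foldl
        (fun o p => some (match o with | none => p.1 | some w => max p.1 w)) none
        = some (t.foldl (fun w p => max p.1 w) q.1) := by
      simpa [List.foldl_cons] using lrefA_max_some t q.1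
    have hB : (q :: t).foldl
        (fun o p => match o with
          | none => some (p.1, p.1)
          | some (lo, hi) => some ((if p.1 < lo then p.1 else lo), (if hi < p.1 then p.1 else hi)))
        none
        = some (t.foldl (fun w p => min p.1 w) q.1, t.foldl (fun w p => max p.1 w) q.1) := by
      simpa [List.foldl_cons] using lrefB_bounds t q.1 q.1
    rw [hAmin, hAmax, hB]
    set mid := t.foldl (fun w p => min p.1 w) q.1 + t.foldl (fun w p => max p.1 w) q.1 with hmid
    set l := q :: t with hl
    show (l.all fun p =>
        (List.foldl PySem.Set.add PySem.Set.empty l).contains (mid - p.1, p.2))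
      = (List.foldl (fun d p => d.insert p.2 (PySem.Set.add (d.getD p.2 PySem.Set.empty) p.1)) PySem.Dict.empty l).values.all
          (fun xs =>
            twoPtrLoop (PySem.List.sorted xs (fun x => x)) mid
              ((PySem.List.sorted xs (fun x => x)).length + 1) 0
              (((PySem.List.sorted xs (fun x => x)).length : Int) - 1))
    have hrow : ∀ y : Int,
        (List.foldl (fun d p => d.insert p.2 (PySem.Set.add (d.getD p.2 PySem.Set.empty) p.1))
          PySem.Dict.empty l).getD y PySem.Set.empty
        = PySem.Set.ofList ((l.filter (fun p => p.2 == y)).map Prod.fst) := by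
      intro y
      rw [lrefB_dict_getD]
      simp [PySem.Dict.getD_empty, PySem.Set.update_nil_left]
    rw [PySem.Dict.values_eq_map_keys _ (lrefB_dict_nodup_keys l) PySem.Set.empty, lrefB_dict_keys,
      show (PySem.Set.empty : PySem.Set (Int × Int)) = [] from rfl, ← PySem.Set.ofList_eq_foldl]
    rw [Bool.eq_iff_iff]
    simp only [List.all_eq_true, List.forall_mem_map, PySem.Set.contains_iff, PySem.Set.mem_ofList,
      hrow, lref_rowcheck, lref_row_mem]
    constructor
    · intro h j _ x hx
      exact h (x, j.2) hx
    · intro h p hp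
      exact h p hp p.1 (by simpa using hp)
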